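-- pv_equiv track=rewrite | github.com/monke181/usacobronzequestions | USACO Coding/usaco python/usacoIntoBlocks.py | initial_check
-- ===== SOURCE A (Python) =====
-- def initial_check(N, sequence):
--     flag = False
--     seen = set()
--     previous = sequence[0]
--     seen.add(previous)
--     for i in range(1, N):
--         if sequence[i] == previous:
--             continue
--         elif sequence[i] in seen:
--             flag = True
--             break
--         else:
--             seen.add(sequence[i])
--             previous = sequence[i]
--
--     return flag
-- ===== SOURCE B (Python) =====
-- def initial_check(N, sequence):
--     prefix = [sequence[i] for i in range(N)]
--     runs = (1 if prefix else 0) + sum(1 for a, b in zip(prefix, prefix[1:]) if b != a)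
--     return runs > len(set(prefix))
-- ===== Notes on version B (the rewrite author's own statement) =====
-- stated objective: alternative
-- what changed: Replaces A's early-exit scan with a mutable seen-set and previous-value state by a stateless counting formulation: build the N-prefix once, count maximal runs (1 + adjacent inequalities via zip) and distinct values, and return runs > distinct.
-- outside the precondition, e.g. on initial_check(7, [3, 3, 0, 3, 2, 1]): A returns True, B raises IndexError
import Mathlib
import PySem

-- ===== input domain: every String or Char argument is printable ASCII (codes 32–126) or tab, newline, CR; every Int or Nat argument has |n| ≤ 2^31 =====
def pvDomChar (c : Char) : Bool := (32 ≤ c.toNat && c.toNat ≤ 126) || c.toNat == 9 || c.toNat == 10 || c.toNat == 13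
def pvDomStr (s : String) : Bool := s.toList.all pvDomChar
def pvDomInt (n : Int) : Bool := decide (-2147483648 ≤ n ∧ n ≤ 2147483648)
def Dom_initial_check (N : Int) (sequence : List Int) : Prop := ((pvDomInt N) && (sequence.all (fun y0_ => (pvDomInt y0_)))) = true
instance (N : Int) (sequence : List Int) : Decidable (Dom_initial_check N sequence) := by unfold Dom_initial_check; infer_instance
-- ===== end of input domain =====

-- B replaces A's early-exit seen-set scan by a stateless count: runs(pref) > distinct(pref);
-- objective 'alternative' (same O(n) cost, different decomposition).

-- ===== PORT A =====
-- the for-loop of A: iterates over the remaining indices, with state (seen, previous); break → true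
def initialLoopA (sequence : List Int) : List Int → PySem.Set Int → Int → Bool
  | [], _, _ => false
  | i :: rest, seen, previous =>
    match PySem.List.pyGet? sequence i with
    | none => false   -- IndexError (sequence[i]); excluded by Pre_initial_check
    | some x =>
      if x = previous then initialLoopA sequence rest seen previous
      else if PySem.Set.contains seen x then true
      else initialLoopA sequence rest (PySem.Set.add seen x) x

def initial_check (N : Int) (sequence : List Int) : Bool :=
  match PySem.List.pyGet? sequence 0 with
  | none => false   -- IndexError (sequence[0]); excluded by Pre_initial_check
  | some previous =>
    initialLoopA sequence (PySem.List.pyRange 1 N 1) (PySem.Set.add PySem.Set.empty previous) previous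

-- ===== PORT B =====
def initial_check_alt (N : Int) (sequence : List Int) : Bool :=
  -- pref = [sequence[i] for i in range(N)]  (out-of-range index = IndexError, excluded by Pre_)
  let pref := (PySem.List.pyRange 0 N 1).map (fun i => (PySem.List.pyGet? sequence i).getD 0)
  -- runs = (1 if pref else 0) + sum(1 for a, b in zip(pref, pref[1:]) if b != a)
  let runs : Nat := (if pref.isEmpty then 0 else 1) +
    ((pref.zip (PySem.List.slice pref (some 1) none)).filter (fun ab => ab.2 != ab.1)).length
  -- return runs > len(set(pref))
  decide (runs > (PySem.Set.ofList pref).length)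

-- ===== PRECONDITION & SPEC =====
-- Pre_ excludes empty sequences (A reads sequence[0] unconditionally: IndexError) and N > len(sequence):
-- there A raises IndexError unless an early repeat breaks the loop first (so on some such inputs A returns
-- True), while B, which builds the whole N-pref up front, raises IndexError on all of them.
def Pre_initial_check (N : Int) (sequence : List Int) : Prop :=
  sequence ≠ [] ∧ N ≤ (sequence.length : Int)
instance (N : Int) (sequence : List Int) : Decidable (Pre_initial_check N sequence) := by
  unfold Pre_initial_check; infer_instance

def pvWitness_initial_check : Int × List Int := (2, [1, 2])

def Spec_initial_check (N : Int) (sequence : List Int) (out : Bool) : Prop := out = initial_check_alt N sequence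
instance (N : Int) (sequence : List Int) (out : Bool) : Decidable (Spec_initial_check N sequence out) := by unfold Spec_initial_check; infer_instance

-- ===== CLAIM (what is proved, stated in full; the proofs are below) =====
def Claim_equal_initial_check : Prop := ∀ (N : Int) (sequence : List Int), Dom_initial_check N sequence → Pre_initial_check N sequence → Spec_initial_check N sequence (initial_check N sequence)

-- ===== LEMMAS AND PROOFS =====

-- A's loop lifted to the list of fetched values
def loopL : List Int → PySem.Set Int → Int → Bool
  | [], _, _ => false
  | x :: xs, seen, prev =>
    if x = prev then loopL xs seen prev
    else if PySem.Set.contains seen x then true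
    else loopL xs (PySem.Set.add seen x) x

-- number of run boundaries of (prev :: xs)
def bnd : Int → List Int → Nat
  | _, [] => 0
  | p, x :: xs => (if x = p then 0 else 1) + bnd x xs

theorem loopA_eq_loopL (sequence : List Int) (idxs : List Int)
    (h : ∀ i ∈ idxs, (PySem.List.pyGet? sequence i).isSome) :
    ∀ (seen : PySem.Set Int) (prev : Int),
      initialLoopA sequence idxs seen prev
        = loopL (idxs.map (fun i => (PySem.List.pyGet? sequence i).getD 0)) seen prev := by
  induction idxs with
  | nil => intro seen prev; rfl
  | cons i rest ih =>
    intro seen prev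
    obtain ⟨x, hx⟩ := Option.isSome_iff_exists.mp (h i (List.mem_cons_self))
    simp only [initialLoopA, loopL, List.map_cons, hx, Option.getD_some]
    have ih' := ih (fun j hj => h j (List.mem_cons_of_mem _ hj))
    split_ifs <;> simp [ih']

theorem set_add_of_mem (s : PySem.Set Int) (x : Int) (hx : x ∈ s) : PySem.Set.add s x = s := by
  simp [PySem.Set.add, PySem.Set.contains, hx]

theorem set_add_len_le (s : PySem.Set Int) (x : Int) :
    (PySem.Set.add s x).length ≤ s.length + 1 := by
  by_cases hx : x ∈ s <;> simp [PySem.Set.add, PySem.Set.contains, hx]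

theorem foldl_add_len_le (xs : List Int) :
    ∀ (s : PySem.Set Int) (p : Int), p ∈ s →
      (xs.foldl PySem.Set.add s).length ≤ s.length + bnd p xs := by
  induction xs with
  | nil => intro s p _; simp [bnd]
  | cons x xs ih =>
    intro s p hp
    by_cases hxp : x = p
    · subst hxp
      simp only [List.foldl_cons, set_add_of_mem s x hp, bnd, if_pos rfl]
      simpa using ih s x hp
    · simp only [List.foldl_cons, bnd, if_neg hxp]
      have hmem : x ∈ PySem.Set.add s x := by
        simp [PySem.Set.add]; split_ifs with h
        · simpa [PySem.Set.contains] using h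
        · simp
      calc ((xs.foldl PySem.Set.add (PySem.Set.add s x)).length)
          ≤ (PySem.Set.add s x).length + bnd x xs := ih _ x hmem
        _ ≤ s.length + 1 + bnd x xs := by
              have := set_add_len_le s x; omega
        _ = s.length + ((1 + bnd x xs)) := by omega

theorem set_add_len_not_mem (s : PySem.Set Int) (x : Int) (hx : x ∉ s) :
    (PySem.Set.add s x).length = s.length + 1 := by
  simp [PySem.Set.add, PySem.Set.contains, hx]

theorem mem_set_add_self (s : PySem.Set Int) (x : Int) : x ∈ PySem.Set.add s x := by
  by_cases hx : x ∈ s <;> simp [PySem.Set.add, PySem.Set.contains, hx]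

theorem loopL_eq_count (xs : List Int) :
    ∀ (s : PySem.Set Int) (p : Int), p ∈ s →
      loopL xs s p = decide ((xs.foldl PySem.Set.add s).length < s.length + bnd p xs) := by
  induction xs with
  | nil => intro s p _; simp [loopL, bnd]
  | cons x xs ih =>
    intro s p hp
    by_cases hxp : x = p
    · subst hxp
      have hadd : PySem.Set.add s x = s := set_add_of_mem s x hp
      simp [loopL, hadd, bnd, ih s x hp]
    · by_cases hxs : x ∈ s
      · have hc : PySem.Set.contains s x = true := by simp [PySem.Set.contains, hxs]
        have hl : loopL (x :: xs) s p = true := by simp [loopL, hxp, hc, hxs]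
        rw [hl, List.foldl_cons, set_add_of_mem s x hxs]
        have hle := foldl_add_len_le xs s x hxs
        symm
        simp only [bnd, if_neg hxp, decide_eq_true_eq]
        omega
      · have hc : PySem.Set.contains s x = false := by simp [PySem.Set.contains, hxs]
        simp only [loopL, if_neg hxp, hc, Bool.false_eq_true, if_neg, List.foldl_cons]
        rw [ih (PySem.Set.add s x) x (mem_set_add_self s x), set_add_len_not_mem s x hxs,
            Nat.add_assoc]
        simp [bnd, hxp]

theorem zip_count_eq_bnd (xs : List Int) : ∀ p : Int,
    (((p :: xs).zip xs).filter (fun ab => ab.2 != ab.1)).length = bnd p xs := by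
  induction xs with
  | nil => intro p; simp [bnd]
  | cons x xs ih =>
    intro p
    by_cases hxp : x = p
    · subst hxp; simp [bnd, ih]
    · simp [bnd, hxp, ih x, Nat.add_comm]

-- ===== VERDICT (by name: the statement is the Claim_ definition above) =====
theorem initial_check_spec : Claim_equal_initial_check := by
  intro N sequence _ hpre
  obtain ⟨hne, hNle⟩ := hpre
  unfold Spec_initial_check initial_check initial_check_alt
  obtain ⟨p0, hp0⟩ : ∃ p0, PySem.List.pyGet? sequence 0 = some p0 := by
    cases sequence with
    | nil => exact absurd rfl hne
    | cons a l => exact ⟨a, PySem.List.pyGet?_zero_cons a l⟩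
  have hadd : PySem.Set.add PySem.Set.empty p0 = [p0] := by
    simp [PySem.Set.add, PySem.Set.empty, PySem.Set.contains]
  by_cases hN : N ≤ 0
  · rw [PySem.List.pyRange_one_eq_nil (by omega : N ≤ 1), PySem.List.pyRange_one_eq_nil hN]
    simp [hp0, initialLoopA, PySem.Set.ofList]
  · have hN' : (0 : Int) < N := by omega
    have hvalid : ∀ i ∈ PySem.List.pyRange 1 N 1, (PySem.List.pyGet? sequence i).isSome := by
      intro i hi
      rw [PySem.List.mem_pyRange_one] at hi
      rw [Option.isSome_iff_ne_none]
      intro hnone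
      rw [PySem.List.pyGet?_eq_none_iff] at hnone
      apply hnone
      simp only [PySem.Raise.InRange]
      omega
    rw [PySem.List.pyRange_one_cons hN']
    simp only [hp0, zero_add, List.map_cons, Option.getD_some, PySem.List.slice_from_one,
      List.tail_cons, List.isEmpty_cons, Bool.false_eq_true, if_neg, zip_count_eq_bnd,
      loopA_eq_loopL sequence _ hvalid, PySem.Set.ofList_eq_foldl, List.foldl_cons, hadd]
    have h2 : PySem.Set.add ([] : PySem.Set Int) p0 = [p0] := hadd
    rw [h2, loopL_eq_count _ [p0] p0 (by simp)]
    simp only [List.length_cons, List.length_nil, Nat.zero_add, if_neg]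
    rfl
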